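-- pv_equiv track=rewrite | github.com/pypi-data/pypi-mirror-262 | packages/rdflib-rdfcbor/rdflib_rdfcbor-0.1.0.tar.gz/rdflib_rdfcbor-0.1.0/rdflib_rdfcbor/molecule.py | bitmap
-- ===== SOURCE A (Python) =====
-- def bitmap(groups):
--     elements = []
--     bits = 0
--
--     group_end = 0
--     for group in groups:
--         group_end = group_end + len(group)
--         # mark the ith position
--         bits = bits | (1 << group_end)
--         elements = elements + group
--
--     return bits, elements
-- ===== SOURCE B (Python) =====
-- def bitmap(groups):
--     # Build the mask right-to-left: appending a group of length L on the left
--     # shifts every existing boundary up by L and adds a new boundary at bit L.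
--     bits = 0
--     for group in reversed(groups):
--         bits = (bits << len(group)) | (1 << len(group))
--     elements = []
--     for group in groups:
--         elements.extend(group)
--     return bits, elements
-- ===== Notes on version B (the rewrite author's own statement) =====
-- stated objective: faster
-- what changed: Builds the boundary mask right-to-left by shifting the whole mask left by each group's length (no running group_end offset is maintained), and flattens elements with extend instead of A's quadratic repeated list concatenation.
import Mathlib
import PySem

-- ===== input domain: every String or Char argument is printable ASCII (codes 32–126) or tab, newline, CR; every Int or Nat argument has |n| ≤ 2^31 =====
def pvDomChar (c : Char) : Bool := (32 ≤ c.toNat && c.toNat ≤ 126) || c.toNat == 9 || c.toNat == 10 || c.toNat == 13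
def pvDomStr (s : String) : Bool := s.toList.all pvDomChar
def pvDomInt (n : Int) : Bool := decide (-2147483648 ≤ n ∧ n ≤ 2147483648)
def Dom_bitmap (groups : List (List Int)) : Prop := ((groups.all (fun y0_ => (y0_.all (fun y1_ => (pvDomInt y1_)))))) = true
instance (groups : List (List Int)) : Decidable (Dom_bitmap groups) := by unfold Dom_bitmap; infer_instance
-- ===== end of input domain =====

-- B builds the boundary mask right-to-left by whole-mask shifts (no running offset) and flattens with extend instead of A's repeated list concatenation; same return value.

-- ===== PORT A =====
-- state: (elements, bits, group_end), exactly A's three loop variables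
def bitmap (groups : List (List Int)) : Int × List Int :=
  let st := groups.foldl
    (fun (st : List Int × Int × Nat) group =>
      let group_end := st.2.2 + group.length
      (st.1 ++ group, Int.lor st.2.1 ((1 : Int) <<< group_end), group_end))
    ([], 0, 0)
  (st.2.1, st.1)

-- ===== PORT B =====
-- first loop: over reversed(groups), accumulator bits; second loop: extend
def bitmap_alt (groups : List (List Int)) : Int × List Int :=
  let bits := groups.reverse.foldl
    (fun (b : Int) group => Int.lor (b <<< group.length) ((1 : Int) <<< group.length)) 0
  let elements := groups.foldl (fun (acc : List Int) group => acc ++ group) []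
  (bits, elements)

-- ===== PRECONDITION & SPEC =====
def Spec_bitmap (groups : List (List Int)) (out : Int × List Int) : Prop := out = bitmap_alt groups
instance (groups : List (List Int)) (out : Int × List Int) : Decidable (Spec_bitmap groups out) := by unfold Spec_bitmap; infer_instance

-- ===== CLAIM (what is proved, stated in full; the proofs are below) =====
def Claim_equal_bitmap : Prop := ∀ (groups : List (List Int)), Dom_bitmap groups → Spec_bitmap groups (bitmap groups)

-- ===== LEMMAS AND PROOFS =====

-- Nat-level models of the two bit computations (proof helpers only)
def natBitsA : List Nat → Nat → Nat → Nat
  | [], bits, _ => bits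
  | l :: ls, bits, ge => natBitsA ls (bits ||| (1 <<< (ge + l))) (ge + l)

def natBitsB : List Nat → Nat
  | [] => 0
  | l :: ls => (natBitsB ls <<< l) ||| (1 <<< l)

theorem nat_shiftLeft_or (a b n : Nat) :
    (a ||| b) <<< n = (a <<< n) ||| (b <<< n) :=
  Nat.eq_of_testBit_eq fun i => by
    simp [Nat.testBit_shiftLeft, Nat.testBit_or, Bool.and_or_distrib_left]

theorem natBitsA_eq (ls : List Nat) : ∀ (bits ge : Nat),
    natBitsA ls bits ge = bits ||| (natBitsB ls <<< ge) := by
  induction ls with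
  | nil => intro bits ge; simp [natBitsA, natBitsB]
  | cons l ls ih =>
    intro bits ge
    rw [natBitsA, natBitsB, ih, nat_shiftLeft_or, ← Nat.shiftLeft_add, ← Nat.shiftLeft_add,
      Nat.add_comm l ge, Nat.or_assoc, Nat.or_comm (1 <<< (ge + l))]

theorem int_lor_natCast (a b : Nat) : Int.lor (↑a) (↑b) = ↑(a ||| b) := rfl

-- A's fold: bits component matches natBitsA, elements component is a flatten
theorem bitmap_fold_eq (groups : List (List Int)) : ∀ (el : List Int) (bits ge : Nat),
    groups.foldl
      (fun (st : List Int × Int × Nat) group =>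
        let group_end := st.2.2 + group.length
        (st.1 ++ group, Int.lor st.2.1 ((1 : Int) <<< group_end), group_end))
      (el, (bits : Int), ge)
    = (el ++ groups.flatten,
       (natBitsA (groups.map List.length) bits ge : Int),
       ge + (groups.map List.length).sum) := by
  induction groups with
  | nil => intro el bits ge; simp [natBitsA]
  | cons g gs ih =>
    intro el bits ge
    have hcast : Int.lor (bits : Int) ((1 : Int) <<< (ge + g.length))
        = ((bits ||| (1 <<< (ge + g.length)) : Nat) : Int) := by
      rw [← int_lor_natCast, Int.natCast_shiftLeft]; norm_num
    simp only [List.foldl_cons, hcast, ih, natBitsA, List.map_cons, List.sum_cons]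
    simp [List.append_assoc, Nat.add_assoc]

-- B's reversed loop: bits matches natBitsB
theorem revBits_eq (groups : List (List Int)) :
    groups.foldr (fun group b => Int.lor (b <<< group.length) ((1 : Int) <<< group.length)) 0
    = (natBitsB (groups.map List.length) : Int) := by
  induction groups with
  | nil => simp [natBitsB]
  | cons g gs ih =>
    simp only [List.foldr_cons, ih, List.map_cons, natBitsB]
    rw [← int_lor_natCast, Int.natCast_shiftLeft, Int.natCast_shiftLeft,
      ← Int.shiftLeft_natCast_right]
    norm_num
    rw [Int.shiftLeft_natCast_right]

theorem foldl_append_eq_flatten (groups : List (List Int)) : ∀ (el : List Int),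
    groups.foldl (fun (acc : List Int) group => acc ++ group) el = el ++ groups.flatten := by
  induction groups with
  | nil => intro el; simp
  | cons g gs ih => intro el; simp [ih, List.append_assoc]

-- ===== VERDICT (by name: the statement is the Claim_ definition above) =====
theorem bitmap_spec : Claim_equal_bitmap := by
  intro groups _
  show bitmap groups = bitmap_alt groups
  have hA := bitmap_fold_eq groups [] 0 0
  simp only [Nat.cast_zero] at hA
  simp only [bitmap, bitmap_alt, hA, List.foldl_reverse, foldl_append_eq_flatten,
    List.nil_append]
  refine Prod.ext ?_ rfl
  show ((natBitsA (groups.map List.length) 0 0 : Nat) : Int) = _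
  rw [natBitsA_eq, Nat.shiftLeft_zero, Nat.zero_or]
  simpa using (revBits_eq groups).symm
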